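-- pv_equiv track=rewrite | github.com/gASK13/AOC | 2021/06/06.py | build_add_on_day
-- ===== SOURCE A (Python) =====
-- def build_add_on_day(days):
--     addons = {}
--     for i in range(days + 1):
--         addons[i] = 1
--         delta = i - 9
--         while delta > 0:
--             addons[i] += addons[delta]
--             delta -= 7
--
--     return addons
-- ===== SOURCE B (Python) =====
-- def build_add_on_day(days):
--     addons = {}
--     for i in range(days + 1):
--         addons[i] = 1 if i < 10 else addons[i - 7] + addons[i - 9]
--     return addons
-- ===== Notes on version B (the rewrite author's own statement) =====
-- stated objective: faster
-- what changed: Replaced A's inner while-loop that re-sums addons[i-9], addons[i-16], ... for every day with the O(1)-per-day recurrence addons[i] = addons[i-7] + addons[i-9] for i >= 10 (base case 1), turning the O(days^2) table build into a single O(days) pass.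
import Mathlib
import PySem

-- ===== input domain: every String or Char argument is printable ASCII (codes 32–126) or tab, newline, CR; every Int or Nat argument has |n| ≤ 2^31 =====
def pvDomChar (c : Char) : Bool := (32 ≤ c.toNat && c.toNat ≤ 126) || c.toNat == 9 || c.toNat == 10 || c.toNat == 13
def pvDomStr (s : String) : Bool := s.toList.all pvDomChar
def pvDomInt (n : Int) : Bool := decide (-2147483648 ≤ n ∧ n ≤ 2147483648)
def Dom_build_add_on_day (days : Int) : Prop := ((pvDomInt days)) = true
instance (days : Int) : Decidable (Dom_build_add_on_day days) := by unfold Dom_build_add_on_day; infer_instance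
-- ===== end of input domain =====

-- B replaces A's inner while-loop summation by the O(days) recurrence
-- addons[i] = addons[i-7] + addons[i-9] for i >= 10 (base case 1): one pass instead of a nested scan.

-- ===== PORT A =====
-- inner 'while delta > 0: addons[i] += addons[delta]; delta -= 7'
-- (Python's addons[i] += addons[delta] reads keys that are always present; getD 0 is exact on every state this port reaches)
def pvAWhile (d : PySem.Dict Int Int) (i : Int) (delta : Int) : PySem.Dict Int Int :=
  if 0 < delta then
    pvAWhile (d.insert i (d.getD i 0 + d.getD delta 0)) i (delta - 7)
  else d
termination_by delta.toNat
decreasing_by omega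

def build_add_on_day (days : Int) : List (Int × Int) :=
  ((PySem.List.pyRange 0 (days + 1) 1).foldl
    (fun d i => pvAWhile (d.insert i 1) i (i - 9)) PySem.Dict.empty).items

-- ===== PORT B =====
-- (Python's addons[i-7], addons[i-9] read keys always present when i >= 10; getD 0 is exact here)
def build_add_on_day_alt (days : Int) : List (Int × Int) :=
  ((PySem.List.pyRange 0 (days + 1) 1).foldl
    (fun d i => d.insert i (if i < 10 then 1 else d.getD (i - 7) 0 + d.getD (i - 9) 0))
    PySem.Dict.empty).items

-- ===== PRECONDITION & SPEC =====
def Spec_build_add_on_day (days : Int) (out : List (Int × Int)) : Prop := out = build_add_on_day_alt days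
instance (days : Int) (out : List (Int × Int)) : Decidable (Spec_build_add_on_day days out) := by unfold Spec_build_add_on_day; infer_instance

-- ===== CLAIM (what is proved, stated in full; the proofs are below) =====
def Claim_equal_build_add_on_day : Prop := ∀ (days : Int), Dom_build_add_on_day days → Spec_build_add_on_day days (build_add_on_day days)

-- ===== LEMMAS AND PROOFS =====

-- the common value: number of descendants contribution for a timer reset at day i
def pvV (n : Nat) : Int :=
  if h : n < 10 then 1 else pvV (n - 7) + pvV (n - 9)
termination_by n
decreasing_by all_goals omega

-- the sum A's while loop adds, starting from delta
def pvS (delta : Int) : Int :=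
  if h : 0 < delta then pvV delta.toNat + pvS (delta - 7) else 0
termination_by delta.toNat
decreasing_by omega

lemma pvV_lt {n : Nat} (h : n < 10) : pvV n = 1 := by rw [pvV, dif_pos h]

lemma pvV_ge {n : Nat} (h : ¬ n < 10) : pvV n = pvV (n - 7) + pvV (n - 9) := by
  rw [pvV, dif_neg h]

lemma pvS_pos {delta : Int} (h : 0 < delta) :
    pvS delta = pvV delta.toNat + pvS (delta - 7) := by rw [pvS, dif_pos h]

lemma pvS_nonpos {delta : Int} (h : ¬ 0 < delta) : pvS delta = 0 := by rw [pvS, dif_neg h]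

-- the model dictionary after processing days 0..n
def pvD : Nat → PySem.Dict Int Int
  | 0 => PySem.Dict.empty.insert 0 (pvV 0)
  | n + 1 => (pvD n).insert ((n : Int) + 1) (pvV (n + 1))

lemma pvD_getD (n : Nat) : ∀ j : Nat, j ≤ n → (pvD n).getD (j : Int) 0 = pvV j := by
  induction n with
  | zero =>
    intro j hj
    interval_cases j
    simp [pvD, PySem.Dict.getD_insert_self]
  | succ n ih =>
    intro j hj
    by_cases h : j = n + 1
    · subst h
      simp [pvD, PySem.Dict.getD_insert_self]
    · have hne : (j : Int) ≠ (n : Int) + 1 := by omega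
      rw [pvD, PySem.Dict.getD_insert_of_ne _ _ _ hne, ih j (by omega)]

lemma pvV_eq_one_add_pvS (i : Nat) : pvV i = 1 + pvS ((i : Int) - 9) := by
  induction i using Nat.strong_induction_on with
  | _ i ih =>
    by_cases h : i < 10
    · rw [pvV_lt h, pvS_nonpos (by omega)]; ring
    · have ih7 := ih (i - 7) (by omega)
      rw [pvV_ge h, pvS_pos (by omega : (0:Int) < (i : Int) - 9)]
      have hcast : ((i : Int) - 9).toNat = i - 9 := by omega
      have hcast2 : ((i - 7 : Nat) : Int) - 9 = (i : Int) - 9 - 7 := by omega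
      rw [hcast, ih7, hcast2]
      ring

lemma pvAWhile_eq (n : Nat) : ∀ (t : Nat) (delta : Int), delta.toNat ≤ t → delta ≤ (n : Int) →
    ∀ c, pvAWhile ((pvD n).insert ((n : Int) + 1) c) ((n : Int) + 1) delta
      = (pvD n).insert ((n : Int) + 1) (c + pvS delta) := by
  intro t
  induction t with
  | zero =>
    intro delta ht hn c
    have hd : ¬ (0 < delta) := by omega
    rw [pvAWhile, if_neg hd, pvS_nonpos hd, add_zero]
  | succ t ih =>
    intro delta ht hn c
    by_cases hd : 0 < delta
    · rw [pvAWhile, if_pos hd]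
      have hne : delta ≠ (n : Int) + 1 := by omega
      have hget : ((pvD n).insert ((n : Int) + 1) c).getD delta 0 = pvV delta.toNat := by
        rw [PySem.Dict.getD_insert_of_ne _ _ _ hne]
        have hcast : ((delta.toNat : Nat) : Int) = delta := by omega
        rw [← hcast]
        exact pvD_getD n delta.toNat (by omega)
      rw [PySem.Dict.getD_insert_self, hget, PySem.Dict.insert_insert_self]
      rw [ih (delta - 7) (by omega) (by omega), pvS_pos hd]
      congr 1
      ring
    · rw [pvAWhile, if_neg hd, pvS_nonpos hd, add_zero]

lemma pvD_insert_succ (n : Nat) :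
    pvD (n + 1) = (pvD n).insert ((n : Int) + 1) (pvV (n + 1)) := rfl

lemma pvRange_split (n : Nat) : PySem.List.pyRange 0 (((n + 1 : Nat) : Int) + 1) 1
    = PySem.List.pyRange 0 ((n : Int) + 1) 1 ++ [(n : Int) + 1] := by
  have h := PySem.List.pyRange_one_succ_right (a := 0) (b := (n : Int) + 1) (by omega)
  rw [show (((n + 1 : Nat) : Int) + 1) = ((n : Int) + 1) + 1 by push_cast; ring]
  exact h

lemma foldA (n : Nat) :
    (PySem.List.pyRange 0 ((n : Int) + 1) 1).foldl
      (fun d i => pvAWhile (d.insert i 1) i (i - 9)) PySem.Dict.empty = pvD n := by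
  induction n with
  | zero =>
    rw [show ((0:Nat):Int) + 1 = 0 + 1 by norm_num, PySem.List.pyRange_one_singleton]
    simp only [List.foldl_cons, List.foldl_nil]
    rw [pvAWhile, if_neg (by omega)]
    rw [show pvD 0 = PySem.Dict.empty.insert 0 (pvV 0) from rfl, pvV_lt (by omega)]
  | succ n ih =>
    rw [pvRange_split n, List.foldl_append, ih]
    simp only [List.foldl_cons, List.foldl_nil]
    rw [pvAWhile_eq n (((n : Int) + 1 - 9).toNat) ((n : Int) + 1 - 9) le_rfl (by omega) 1]
    rw [pvD_insert_succ]
    congr 1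
    have := pvV_eq_one_add_pvS (n + 1)
    push_cast at this
    rw [this]

lemma foldB (n : Nat) :
    (PySem.List.pyRange 0 ((n : Int) + 1) 1).foldl
      (fun d i => d.insert i (if i < 10 then 1 else d.getD (i - 7) 0 + d.getD (i - 9) 0))
      PySem.Dict.empty = pvD n := by
  induction n with
  | zero =>
    rw [show ((0:Nat):Int) + 1 = 0 + 1 by norm_num, PySem.List.pyRange_one_singleton]
    simp only [List.foldl_cons, List.foldl_nil]
    rw [if_pos (by omega)]
    rw [show pvD 0 = PySem.Dict.empty.insert 0 (pvV 0) from rfl, pvV_lt (by omega)]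
  | succ n ih =>
    rw [pvRange_split n, List.foldl_append, ih]
    simp only [List.foldl_cons, List.foldl_nil]
    rw [pvD_insert_succ]
    congr 1
    by_cases h : (n : Int) + 1 < 10
    · rw [if_pos h, pvV_lt (by omega)]
    · rw [if_neg h, pvV_ge (by omega : ¬ n + 1 < 10)]
      have h7 : ((n + 1 - 7 : Nat) : Int) = (n : Int) + 1 - 7 := by omega
      have h9 : ((n + 1 - 9 : Nat) : Int) = (n : Int) + 1 - 9 := by omega
      rw [← h7, ← h9, pvD_getD n (n + 1 - 7) (by omega), pvD_getD n (n + 1 - 9) (by omega)]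

-- ===== VERDICT (by name: the statement is the Claim_ definition above) =====
theorem build_add_on_day_spec : Claim_equal_build_add_on_day := by
  intro days _
  unfold Spec_build_add_on_day build_add_on_day build_add_on_day_alt
  by_cases h : days < 0
  · rw [PySem.List.pyRange_one_eq_nil (by omega : days + 1 ≤ 0)]
    rfl
  · have hd : days = ((days.toNat : Nat) : Int) := by omega
    rw [hd, foldA, foldB]
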